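-- pv_equiv track=rewrite | github.com/aryner/personal_site | tools/notesToJson.py | getTag
-- ===== SOURCE A (Python) =====
-- def getTag(lines,index):
--   line = lines[index]
--   if line == '#SECTION' or line == '':
--     return 'end',index
--   elif line == '#ENDSUB':
--     return 'end',index+1
--   elif line == '#SUBSECTION':
--     return 'subsection',index+1
--   elif line == '#CODE':
--     return 'pre',index+1
--   elif line == '#ENDCODE':
--     return getTag(lines,index+1)
--   else:
--     return 'p',index
-- ===== SOURCE B (Python) =====
-- def getTag(lines, index):
--     # iterative: skip the '#ENDCODE' run, then dispatch once via a table
--     while lines[index] == '#ENDCODE':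
--         index += 1
--     line = lines[index]
--     if line == '#SECTION' or line == '':
--         return 'end', index
--     table = {'#ENDSUB': ('end', index + 1),
--              '#SUBSECTION': ('subsection', index + 1),
--              '#CODE': ('pre', index + 1)}
--     return table.get(line, ('p', index))
-- ===== Notes on version B (the rewrite author's own statement) =====
-- stated objective: simpler
-- what changed: Replaced the tail recursion with an explicit skip loop over the '#ENDCODE' run followed by a single table-based dispatch instead of the recursive if-chain.
import Mathlib
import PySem

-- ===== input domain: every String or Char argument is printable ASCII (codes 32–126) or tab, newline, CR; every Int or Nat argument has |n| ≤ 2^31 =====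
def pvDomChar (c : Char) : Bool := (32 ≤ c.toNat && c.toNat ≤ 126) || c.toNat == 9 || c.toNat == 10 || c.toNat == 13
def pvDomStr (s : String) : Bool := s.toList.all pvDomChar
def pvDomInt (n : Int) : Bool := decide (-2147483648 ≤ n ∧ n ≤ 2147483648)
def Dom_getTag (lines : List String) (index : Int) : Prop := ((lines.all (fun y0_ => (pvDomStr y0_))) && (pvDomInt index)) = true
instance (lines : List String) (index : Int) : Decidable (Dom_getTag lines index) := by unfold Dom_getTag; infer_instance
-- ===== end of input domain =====

-- B replaces A's tail recursion by an explicit skip loop plus one table dispatch (objective: simpler).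
-- ===== PORT A =====
-- A's recursion: look up lines[index]; the '#ENDCODE' branch recurses at index+1.
-- The 'none' case of pyGet? is Python's IndexError, excluded by Pre_getTag.
def getTag (lines : List String) (index : Int) : String × Int :=
  match h : PySem.List.pyGet? lines index with
  | none => ("", 0)   -- IndexError in Python; outside Pre_getTag
  | some line =>
    if line == "#SECTION" || line == "" then ("end", index)
    else if line == "#ENDSUB" then ("end", index + 1)
    else if line == "#SUBSECTION" then ("subsection", index + 1)
    else if line == "#CODE" then ("pre", index + 1)
    else if line == "#ENDCODE" then getTag lines (index + 1)
    else ("p", index)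
termination_by ((lines.length : Int) - index).toNat
decreasing_by
  have hin : PySem.Raise.InRange lines.length index := by
    by_contra hc
    rw [← PySem.List.pyGet?_eq_none_iff] at hc
    simp [hc] at h
  have := hin.2
  omega

-- ===== PORT B =====
-- the 'while lines[index] == "#ENDCODE": index += 1' loop of Source B, returning the final index
def skipEndcode (lines : List String) (index : Int) : Int :=
  -- loop guard 'lines[index] == "#ENDCODE"': false when pyGet? is none (Python raises there)
  if h : PySem.List.pyGet? lines index = some "#ENDCODE" then skipEndcode lines (index + 1)
  else index
termination_by ((lines.length : Int) - index).toNat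
decreasing_by
  have hin : PySem.Raise.InRange lines.length index := by
    by_contra hc
    rw [← PySem.List.pyGet?_eq_none_iff] at hc
    rw [hc] at h
    exact absurd h (by simp)
  have := hin.2
  omega

def getTag_alt (lines : List String) (index : Int) : String × Int :=
  let i := skipEndcode lines index
  match PySem.List.pyGet? lines i with
  | none => ("", 0)   -- IndexError in Python; outside Pre_getTag
  | some line =>
    if line == "#SECTION" || line == "" then ("end", i)
    else
      let table : PySem.Dict String (String × Int) :=
        (((PySem.Dict.empty).insert "#ENDSUB" ("end", i + 1)).insert
          "#SUBSECTION" ("subsection", i + 1)).insert "#CODE" ("pre", i + 1)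
      table.getD line ("p", i)

-- ===== PRECONDITION & SPEC =====
-- Pre_ excludes exactly the IndexError inputs: the start index must be in range and the
-- '#ENDCODE' run starting there must end before running off the end of the list.
def Pre_getTag (lines : List String) (index : Int) : Prop :=
  PySem.Raise.InRange lines.length index ∧
  ∃ j ∈ PySem.List.pyRange index (lines.length) 1,
    PySem.List.pyGet? lines j ≠ some "#ENDCODE"
instance (lines : List String) (index : Int) : Decidable (Pre_getTag lines index) := by
  unfold Pre_getTag; infer_instance
def pvWitness_getTag : List String × Int := (["#ENDCODE", "#CODE"], 0)
def Spec_getTag (lines : List String) (index : Int) (out : String × Int) : Prop := out = getTag_alt lines index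
instance (lines : List String) (index : Int) (out : String × Int) : Decidable (Spec_getTag lines index out) := by unfold Spec_getTag; infer_instance

-- ===== CLAIM (what is proved, stated in full; the proofs are below) =====
def Claim_equal_getTag : Prop := ∀ (lines : List String) (index : Int), Dom_getTag lines index → Pre_getTag lines index → Spec_getTag lines index (getTag lines index)

-- ===== LEMMAS AND PROOFS =====

-- one unfolding step of the skip loop on an '#ENDCODE' line
lemma skipEndcode_step (lines : List String) (index : Int)
    (h : PySem.List.pyGet? lines index = some "#ENDCODE") :
    skipEndcode lines index = skipEndcode lines (index + 1) := by
  rw [skipEndcode]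
  simp [h]

-- the skip loop is the identity on a non-'#ENDCODE' line
lemma skipEndcode_stop (lines : List String) (index : Int) (line : String)
    (h : PySem.List.pyGet? lines index = some line) (hne : line ≠ "#ENDCODE") :
    skipEndcode lines index = index := by
  rw [skipEndcode]
  simp [h, hne]

-- the precondition survives one '#ENDCODE' step
lemma pre_step (lines : List String) (index : Int)
    (hp : Pre_getTag lines index)
    (h : PySem.List.pyGet? lines index = some "#ENDCODE") :
    Pre_getTag lines (index + 1) := by
  obtain ⟨hin, j, hj, hjne⟩ := hp
  rw [PySem.List.mem_pyRange_one] at hj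
  have hjne' : j ≠ index := fun he => hjne (he ▸ h)
  have hlo := hin.1
  have hhi := hin.2
  refine ⟨⟨by omega, by omega⟩, j, ?_, hjne⟩
  rw [PySem.List.mem_pyRange_one]
  omega

theorem getTag_eq (lines : List String) (index : Int)
    (hp : Pre_getTag lines index) : getTag lines index = getTag_alt lines index := by
  rcases hg : PySem.List.pyGet? lines index with _ | line
  · rw [PySem.List.pyGet?_eq_none_iff] at hg
    exact absurd hp.1 hg
  · by_cases he : line = "#ENDCODE"
    · subst he
      have hA : getTag lines index = getTag lines (index + 1) := by
        rw [getTag]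
        split
        · simp_all
        · rename_i line' h'
          rw [hg] at h'
          injection h' with he'
          subst he'
          simp
      have hB : getTag_alt lines index = getTag_alt lines (index + 1) := by
        unfold getTag_alt
        rw [skipEndcode_step lines index hg]
      rw [hA, hB]
      exact getTag_eq lines (index + 1) (pre_step lines index hp hg)
    · have hskip := skipEndcode_stop lines index line hg he
      rw [getTag]
      unfold getTag_alt
      simp only [hskip, hg]
      split
      · simp_all
      · rename_i line' h'
        rw [hg] at h'
        injection h' with he'
        subst he'
        by_cases h1 : (line == "#SECTION" || line == "") = true
        · simp [h1]
        · simp only [h1, Bool.false_eq_true, if_false]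
          by_cases h2 : line = "#ENDSUB"
          · subst h2
            simp [PySem.Dict.getD, PySem.Dict.get?, PySem.Dict.insert, PySem.Dict.empty,
              List.find?]
          · by_cases h3 : line = "#SUBSECTION"
            · subst h3
              simp [PySem.Dict.getD, PySem.Dict.get?, PySem.Dict.insert, PySem.Dict.empty,
                List.find?]
            · by_cases h4 : line = "#CODE"
              · subst h4
                simp [PySem.Dict.getD, PySem.Dict.get?, PySem.Dict.insert, PySem.Dict.empty,
                  List.find?]
              · have e2 : ("#ENDSUB" == line) = false := beq_eq_false_iff_ne.mpr (Ne.symm h2)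
                have e3 : ("#SUBSECTION" == line) = false := beq_eq_false_iff_ne.mpr (Ne.symm h3)
                have e4 : ("#CODE" == line) = false := beq_eq_false_iff_ne.mpr (Ne.symm h4)
                simp [he, h2, h3, h4, PySem.Dict.getD, PySem.Dict.get?, PySem.Dict.insert,
                  PySem.Dict.empty, List.find?, e2, e3, e4]
termination_by ((lines.length : Int) - index).toNat
decreasing_by
  have := hp.1.2
  omega

-- ===== VERDICT (by name: the statement is the Claim_ definition above) =====
theorem getTag_spec : Claim_equal_getTag := by
  intro lines index _ hp
  exact getTag_eq lines index hp
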